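-- pv_equiv track=rewrite | github.com/vinchinzu/euler | python/939.py | compute_e
-- ===== SOURCE A (Python) =====
-- MOD = 1234567891
--
-- def compute_e(n, p):
--     """Compute E(n) using partition function."""
--     result = 0
--
--     for k in range(1, n + 1):
--         s_start = (k + 1) // 2
--         for s in range(s_start, k + 1):
--             t = k - s
--             ways = (p[s] * p[t]) % MOD
--             result = (result + ways) % MOD
--
--     return result
-- ===== SOURCE B (Python) =====
-- MOD = 1234567891
--
--
-- def compute_e(n, p):
--     """Compute E(n) using partition function."""
--     if n < 1:
--         return 0
--     inv2 = (MOD + 1) // 2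
--     q = [x % MOD for x in p[:n + 1]]
--     # prefix sums mod MOD: pref[m] = sum(q[0..m]) % MOD
--     pref = []
--     acc = 0
--     for x in q:
--         acc = (acc + x) % MOD
--         pref.append(acc)
--     total = 0
--     for s in range(n + 1):
--         total = (total + q[s] * pref[n - s]) % MOD
--     total = (total - q[0] * q[0]) % MOD
--     diag = 0
--     for s in range(1, n // 2 + 1):
--         diag = (diag + q[s] * q[s]) % MOD
--     return ((total + diag) * inv2) % MOD
-- ===== Notes on version B (the rewrite author's own statement) =====
-- stated objective: faster
-- what changed: Replaced the O(n^2) double loop over pairs (s,t) with an O(n) pass using prefix sums of p modulo MOD: the full symmetric convolution sum plus the diagonal terms, halved via the modular inverse of 2, minus the (0,0) term.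
import Mathlib
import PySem

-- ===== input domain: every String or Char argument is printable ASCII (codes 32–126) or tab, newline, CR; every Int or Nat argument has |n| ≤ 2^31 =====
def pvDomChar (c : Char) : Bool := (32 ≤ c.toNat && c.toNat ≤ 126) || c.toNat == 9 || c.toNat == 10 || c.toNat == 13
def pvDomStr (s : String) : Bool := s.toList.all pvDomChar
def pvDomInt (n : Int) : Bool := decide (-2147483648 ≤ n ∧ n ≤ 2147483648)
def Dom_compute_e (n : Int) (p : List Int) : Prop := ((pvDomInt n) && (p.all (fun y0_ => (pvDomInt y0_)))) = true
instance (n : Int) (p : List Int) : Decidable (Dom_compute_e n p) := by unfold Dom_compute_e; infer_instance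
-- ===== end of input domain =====

-- B replaces A's O(n^2) double loop by an O(n) prefix-sum pass: (symmetric convolution sum + diagonal) halved via the inverse of 2 mod MOD, minus the (0,0) term.

def pvMOD : Int := 1234567891

-- ===== PORT A =====
def compute_e (n : Int) (p : List Int) : Int :=
  (PySem.List.pyRange 1 (n + 1) 1).foldl (fun result k =>
    let s_start := PySem.Int.floordiv (k + 1) 2
    (PySem.List.pyRange s_start (k + 1) 1).foldl (fun result s =>
      let t := k - s
      let ways := PySem.Int.mod (PySem.List.pyGetD p s 0 * PySem.List.pyGetD p t 0) pvMOD
      PySem.Int.mod (result + ways) pvMOD) result) 0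

-- ===== PORT B =====
def compute_e_alt (n : Int) (p : List Int) : Int :=
  if n < 1 then 0 else
  let inv2 := PySem.Int.floordiv (pvMOD + 1) 2
  let q := (PySem.List.slice p none (some (n + 1))).map (fun x => PySem.Int.mod x pvMOD)
  let ap := q.foldl (fun (st : Int × List Int) x =>
      let acc := PySem.Int.mod (st.1 + x) pvMOD
      (acc, st.2 ++ [acc])) ((0 : Int), ([] : List Int))
  let pref := ap.2
  let total := (PySem.List.pyRange 0 (n + 1) 1).foldl (fun total s =>
      PySem.Int.mod (total + PySem.List.pyGetD q s 0 * PySem.List.pyGetD pref (n - s) 0) pvMOD) 0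
  let total2 := PySem.Int.mod (total - PySem.List.pyGetD q 0 0 * PySem.List.pyGetD q 0 0) pvMOD
  let diag := (PySem.List.pyRange 1 (PySem.Int.floordiv n 2 + 1) 1).foldl (fun diag s =>
      PySem.Int.mod (diag + PySem.List.pyGetD q s 0 * PySem.List.pyGetD q s 0) pvMOD) 0
  PySem.Int.mod ((total2 + diag) * inv2) pvMOD

-- ===== PRECONDITION & SPEC =====
-- Pre_ excludes exactly the inputs where A raises IndexError (it reads p[0..n] when n ≥ 1).
def Pre_compute_e (n : Int) (p : List Int) : Prop := n < 1 ∨ n < (p.length : Int)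
instance (n : Int) (p : List Int) : Decidable (Pre_compute_e n p) := by unfold Pre_compute_e; infer_instance
def pvWitness_compute_e : Int × List Int := (3, [1, 1, 2, 3])

def Spec_compute_e (n : Int) (p : List Int) (out : Int) : Prop := out = compute_e_alt n p
instance (n : Int) (p : List Int) (out : Int) : Decidable (Spec_compute_e n p out) := by unfold Spec_compute_e; infer_instance

-- ===== CLAIM (what is proved, stated in full; the proofs are below) =====
def Claim_equal_compute_e : Prop := ∀ (n : Int) (p : List Int), Dom_compute_e n p → Pre_compute_e n p → Spec_compute_e n p (compute_e n p)

-- ===== LEMMAS AND PROOFS =====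

theorem pmod_eq (x : Int) : PySem.Int.mod x pvMOD = x % pvMOD :=
  PySem.Int.mod_eq_emod_of_pos (by norm_num [pvMOD])

def pvP (p : List Int) (i : Nat) : Int := p.getD i 0

def pvPre (p : List Int) (m : Nat) : Int := ∑ t ∈ Finset.range (m + 1), pvP p t

def pvRow (p : List Int) (k : Nat) : Int := ∑ s ∈ Finset.range (k + 1), pvP p s * pvP p (k - s)

def pvInd (p : List Int) (k : Nat) : Int :=
  if k % 2 = 0 then pvP p (k / 2) * pvP p (k / 2) else 0

def pvArow (p : List Int) (k : Nat) : Int :=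
  ∑ s ∈ Finset.Icc ((k + 1) / 2) k, pvP p s * pvP p (k - s)

def pvSA (p : List Int) (N : Nat) : Int :=
  ∑ k ∈ Finset.Icc 1 N, ∑ s ∈ Finset.Icc ((k + 1) / 2) k, pvP p s * pvP p (k - s)

def pvT (p : List Int) (N : Nat) : Int :=
  (∑ s ∈ Finset.range (N + 1), pvP p s * pvPre p (N - s)) - pvP p 0 * pvP p 0

def pvD (p : List Int) (N : Nat) : Int := ∑ s ∈ Finset.Icc 1 (N / 2), pvP p s * pvP p s

theorem pv_foldl_mod {α : Type} (f : α → Int) (l : List α) (r : Int) :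
    l.foldl (fun acc x => (acc + f x) % pvMOD) (r % pvMOD) = (r + (l.map f).sum) % pvMOD := by
  induction l generalizing r with
  | nil => simp
  | cons x l ih =>
    simp only [List.foldl_cons, List.map_cons, List.sum_cons]
    rw [Int.emod_add_emod, ih (r + f x)]; ring_nf

theorem pv_foldl2_mod (l : List Int) (inner : Int → List Int) (w : Int → Int → Int) (r : Int) :
    l.foldl (fun res k => (inner k).foldl (fun res2 s => (res2 + w k s) % pvMOD) res) (r % pvMOD)
      = (r + (l.map (fun k => ((inner k).map (w k)).sum)).sum) % pvMOD := by
  induction l generalizing r with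
  | nil => simp
  | cons k l ih =>
    simp only [List.foldl_cons, List.map_cons, List.sum_cons]
    rw [pv_foldl_mod (w k) (inner k) r, ih (r + ((inner k).map (w k)).sum)]; ring_nf

theorem pv_sum_emod_congr {α : Type} (l : List α) (f g : α → Int)
    (h : ∀ x ∈ l, f x % pvMOD = g x % pvMOD) :
    (l.map f).sum % pvMOD = (l.map g).sum % pvMOD := by
  induction l with
  | nil => rfl
  | cons x l ih =>
    simp only [List.map_cons, List.sum_cons]
    rw [Int.add_emod, h x (by simp), ih (fun y hy => h y (by simp [hy])), ← Int.add_emod]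

theorem pv_map_mod_sum (l : List Int) :
    ((l.map (fun x => x % pvMOD)).sum) % pvMOD = l.sum % pvMOD := by
  have := pv_sum_emod_congr l (fun x => x % pvMOD) (fun x => x)
    (fun x _ => Int.emod_emod_of_dvd _ dvd_rfl)
  simpa using this

theorem pv_take_sum (l : List Int) (r : Nat) (h : r ≤ l.length) :
    (l.take r).sum = ∑ t ∈ Finset.range r, l.getD t 0 := by
  induction l generalizing r with
  | nil =>
    simp only [List.length_nil, Nat.le_zero] at h
    subst h; simp
  | cons x l ih =>
    cases r with
    | zero => simp
    | succ r =>
      simp only [List.take_succ_cons, List.sum_cons]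
      rw [Finset.sum_range_succ']
      simp only [List.getD_cons_succ, List.getD_cons_zero]
      rw [ih r (by simpa using h)]
      ring

theorem pv_fsum_mod_congr (s : Finset ℕ) (f g : ℕ → ℤ)
    (h : ∀ x ∈ s, f x % pvMOD = g x % pvMOD) :
    (∑ x ∈ s, f x) % pvMOD = (∑ x ∈ s, g x) % pvMOD := by
  induction s using Finset.induction_on with
  | empty => rfl
  | insert a s ha ih =>
    rw [Finset.sum_insert ha, Finset.sum_insert ha, Int.add_emod,
      h a (by simp), ih (fun y hy => h y (by simp [hy])), ← Int.add_emod]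

theorem pv_mul_emod_left (a b c : Int) : ((a % pvMOD + b % pvMOD) * c) % pvMOD = ((a + b) * c) % pvMOD := by
  rw [Int.mul_emod, Int.add_emod, Int.emod_emod_of_dvd _ dvd_rfl, Int.emod_emod_of_dvd _ dvd_rfl,
    ← Int.add_emod, ← Int.mul_emod]

theorem pv_bridge {m : ℕ} {g : ℕ → ℤ} : ((List.range m).map g).sum = ∑ j ∈ Finset.range m, g j := rfl

theorem pv_sum_Icc_range (f : ℕ → ℤ) (a b : ℕ) :
    ∑ i ∈ Finset.Icc a b, f i = ∑ i ∈ Finset.range (b + 1 - a), f (a + i) := by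
  rw [← Finset.Ico_add_one_right_eq_Icc, Finset.sum_Ico_eq_sum_range]

theorem pv_pref_fold (xs : List Int) (a : Int) (l0 : List Int) :
    xs.foldl (fun (st : Int × List Int) x =>
        ((st.1 + x) % pvMOD, st.2 ++ [(st.1 + x) % pvMOD])) (a % pvMOD, l0)
      = ((a + xs.sum) % pvMOD,
         l0 ++ (List.range xs.length).map (fun m => (a + (xs.take (m + 1)).sum) % pvMOD)) := by
  induction xs generalizing a l0 with
  | nil => simp
  | cons x xs ih =>
    simp only [List.foldl_cons, List.length_cons]
    rw [Int.emod_add_emod]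
    rw [ih (a + x) (l0 ++ [(a + x) % pvMOD])]
    have hfuneq : ((fun m => (a + (List.take (m + 1) (x :: xs)).sum) % pvMOD) ∘ (fun m => m + 1))
        = fun m => (a + x + (List.take (m + 1) xs).sum) % pvMOD := by
      funext m
      simp only [Function.comp_apply, List.take_succ_cons, List.sum_cons]
      ring_nf
    rw [Prod.mk.injEq]
    constructor
    · rw [List.sum_cons]; ring_nf
    · rw [List.range_succ_eq_map, List.map_cons, List.map_map, hfuneq, List.append_assoc]
      simp

theorem pv_A_char (p : List Int) (N : Nat) : compute_e (N : Int) p = pvSA p N % pvMOD := by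
  have key := pv_foldl2_mod (PySem.List.pyRange 1 ((N : Int) + 1) 1)
      (fun k => PySem.List.pyRange (PySem.Int.floordiv (k + 1) 2) (k + 1) 1)
      (fun k s => (PySem.List.pyGetD p s 0 * PySem.List.pyGetD p (k - s) 0) % pvMOD) 0
  simp only [Int.zero_emod, zero_add] at key
  have lhs_eq : compute_e (N : Int) p
      = (PySem.List.pyRange 1 ((N : Int) + 1) 1).foldl (fun res k =>
          (PySem.List.pyRange (PySem.Int.floordiv (k + 1) 2) (k + 1) 1).foldl
            (fun res2 s => (res2 + (PySem.List.pyGetD p s 0 * PySem.List.pyGetD p (k - s) 0) % pvMOD) % pvMOD) res) 0 := by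
    simp only [compute_e, pmod_eq]
  rw [lhs_eq, key]
  -- strip inner mods
  have h1 : ((PySem.List.pyRange 1 ((N : Int) + 1) 1).map (fun k =>
        ((PySem.List.pyRange (PySem.Int.floordiv (k + 1) 2) (k + 1) 1).map
          (fun s => (PySem.List.pyGetD p s 0 * PySem.List.pyGetD p (k - s) 0) % pvMOD)).sum)).sum % pvMOD
      = ((PySem.List.pyRange 1 ((N : Int) + 1) 1).map (fun k =>
        ((PySem.List.pyRange (PySem.Int.floordiv (k + 1) 2) (k + 1) 1).map
          (fun s => PySem.List.pyGetD p s 0 * PySem.List.pyGetD p (k - s) 0)).sum)).sum % pvMOD := by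
    apply pv_sum_emod_congr
    intro k _
    apply pv_sum_emod_congr
    intro s _
    exact Int.emod_emod_of_dvd _ dvd_rfl
  rw [h1]
  congr 1
  rw [PySem.List.pyRange_one]
  have hN : ((N : Int) + 1 - 1).toNat = N := by omega
  rw [hN]
  simp only [List.map_map]
  rw [pv_bridge]
  rw [pvSA, pv_sum_Icc_range]
  simp only [Nat.add_sub_cancel]
  refine Finset.sum_congr rfl ?_
  intro j hj
  simp only [Function.comp_apply]
  have hk : (1 : Int) + (j : Int) = ((1 + j : Nat) : Int) := by push_cast; ring
  rw [hk]
  have hstep : ((1 + j : Nat) : Int) + 1 = ((1 + j + 1 : Nat) : Int) := by push_cast; ring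
  have hfd : PySem.Int.floordiv (((1 + j : Nat) : Int) + 1) 2 = (((1 + j + 1) / 2 : Nat) : Int) := by
    rw [hstep]; exact_mod_cast PySem.Int.floordiv_natCast (1 + j + 1) 2
  rw [hfd, PySem.List.pyRange_one, hstep]
  have hh : (1 + j + 1) / 2 ≤ 1 + j := by omega
  have hlen : (((1 + j + 1 : Nat) : Int) - (((1 + j + 1) / 2 : Nat) : Int)).toNat
      = (1 + j) + 1 - (1 + j + 1) / 2 := by omega
  rw [hlen]
  simp only [List.map_map]
  rw [pv_bridge]
  rw [pv_sum_Icc_range]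
  refine Finset.sum_congr rfl ?_
  intro s hs
  simp only [Finset.mem_range] at hs
  simp only [Function.comp_apply]
  have h1 : ((((1 + j + 1) / 2 : Nat)) : Int) + (s : Int) = (((1 + j + 1) / 2 + s : Nat) : Int) := by
    push_cast; ring
  have h2 : ((1 + j : Nat) : Int) - (((1 + j + 1) / 2 + s : Nat) : Int)
      = ((1 + j - ((1 + j + 1) / 2 + s) : Nat) : Int) := by omega
  rw [h1, h2, PySem.List.pyGetD_natCast, PySem.List.pyGetD_natCast]
  rfl

theorem pv_I1 (p : List Int) (N : Nat) :
    ∑ s ∈ Finset.range (N + 1), pvP p s * pvPre p (N - s)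
      = ∑ k ∈ Finset.range (N + 1), pvRow p k := by
  simp only [pvPre, pvRow, Finset.mul_sum]
  rw [Finset.sum_sigma', Finset.sum_sigma']
  refine Finset.sum_nbij' (i := fun x => ⟨x.1 + x.2, x.1⟩) (j := fun x => ⟨x.2, x.1 - x.2⟩)
    ?_ ?_ ?_ ?_ ?_
  · rintro ⟨s, t⟩ h
    simp only [Finset.mem_sigma, Finset.mem_range] at h ⊢
    omega
  · rintro ⟨k, s⟩ h
    simp only [Finset.mem_sigma, Finset.mem_range] at h ⊢
    omega
  · rintro ⟨s, t⟩ h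
    simp only [Finset.mem_sigma, Finset.mem_range] at h
    simp only [Sigma.mk.injEq, heq_eq_eq]
    exact ⟨trivial, by omega⟩
  · rintro ⟨k, s⟩ h
    simp only [Finset.mem_sigma, Finset.mem_range] at h
    simp only [Sigma.mk.injEq, heq_eq_eq]
    exact ⟨by omega, trivial⟩
  · rintro ⟨s, t⟩ h
    simp only [Finset.mem_sigma, Finset.mem_range] at h
    simp only []
    congr 2
    omega

theorem pv_reflect (p : List Int) (k h : Nat) (hh : h ≤ k + 1) :
    ∑ s ∈ Finset.range h, pvP p s * pvP p (k - s)
      = ∑ s ∈ Finset.Icc (k + 1 - h) k, pvP p s * pvP p (k - s) := by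
  refine Finset.sum_nbij' (i := fun s => k - s) (j := fun s => k - s) ?_ ?_ ?_ ?_ ?_
  · intro s hs
    simp only [Finset.mem_range] at hs
    simp only [Finset.mem_Icc]
    omega
  · intro s hs
    simp only [Finset.mem_Icc] at hs
    simp only [Finset.mem_range]
    omega
  · intro s hs
    simp only [Finset.mem_range] at hs
    show k - (k - s) = s
    omega
  · intro s hs
    simp only [Finset.mem_Icc] at hs
    show k - (k - s) = s
    omega
  · intro s hs
    simp only [Finset.mem_range] at hs
    have h1 : k - (k - s) = s := by omega
    show pvP p s * pvP p (k - s) = pvP p (k - s) * pvP p (k - (k - s))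
    rw [h1, mul_comm]

theorem pv_I2 (p : List Int) (k : Nat) (hk : 1 ≤ k) :
    pvRow p k + pvInd p k = 2 * pvArow p k := by
  have hsplit : pvRow p k
      = (∑ s ∈ Finset.range ((k + 1) / 2), pvP p s * pvP p (k - s)) + pvArow p k := by
    rw [pvRow, pvArow, Finset.range_eq_Ico,
      ← Finset.sum_Ico_consecutive _ (Nat.zero_le ((k + 1) / 2)) (by omega : (k + 1) / 2 ≤ k + 1),
      Finset.Ico_add_one_right_eq_Icc]
  rw [hsplit, pv_reflect p k ((k + 1) / 2) (by omega)]
  rcases Nat.even_or_odd k with he | ho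
  · have hke : k % 2 = 0 := Nat.even_iff.mp he
    have h1 : k + 1 - (k + 1) / 2 = (k + 1) / 2 + 1 := by omega
    have h2 : ∑ s ∈ Finset.Icc ((k + 1) / 2) k, pvP p s * pvP p (k - s)
        = pvP p ((k + 1) / 2) * pvP p (k - (k + 1) / 2)
          + ∑ s ∈ Finset.Icc ((k + 1) / 2 + 1) k, pvP p s * pvP p (k - s) := by
      rw [← Finset.add_sum_erase (Finset.Icc ((k + 1) / 2) k)
          (fun s => pvP p s * pvP p (k - s))
          (Finset.mem_Icc.mpr (by omega : (k + 1) / 2 ≤ (k + 1) / 2 ∧ (k + 1) / 2 ≤ k)),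
        Finset.Icc_erase_left, ← Finset.Icc_add_one_left_eq_Ioc]
    have h3 : k - (k + 1) / 2 = (k + 1) / 2 := by omega
    have h4 : k / 2 = (k + 1) / 2 := by omega
    rw [h1, pvInd, if_pos hke, pvArow, h2, h3, h4]
    ring
  · have hko : k % 2 = 1 := Nat.odd_iff.mp ho
    have h1 : k + 1 - (k + 1) / 2 = (k + 1) / 2 := by omega
    rw [h1, pvInd, if_neg (by omega), pvArow]
    ring

theorem pv_I3 (p : List Int) (N : Nat) :
    ∑ k ∈ Finset.Icc 1 N, pvInd p k = ∑ s ∈ Finset.Icc 1 (N / 2), pvP p s * pvP p s := by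
  rw [show (∑ k ∈ Finset.Icc 1 N, pvInd p k)
      = ∑ k ∈ (Finset.Icc 1 N).filter (fun k => k % 2 = 0), pvP p (k / 2) * pvP p (k / 2) from ?_]
  · refine Finset.sum_nbij' (i := fun k => k / 2) (j := fun s => 2 * s) ?_ ?_ ?_ ?_ ?_
    · intro k hk
      simp only [Finset.mem_filter, Finset.mem_Icc] at hk
      simp only [Finset.mem_Icc]
      omega
    · intro s hs
      simp only [Finset.mem_Icc] at hs
      simp only [Finset.mem_filter, Finset.mem_Icc]
      omega
    · intro k hk
      simp only [Finset.mem_filter, Finset.mem_Icc] at hk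
      show 2 * (k / 2) = k
      omega
    · intro s hs
      simp only [Finset.mem_Icc] at hs
      show 2 * s / 2 = s
      omega
    · intro k hk
      rfl
  · rw [Finset.sum_filter]
    refine Finset.sum_congr rfl ?_
    intro k _
    rw [pvInd]

theorem pv_identity (p : List Int) (N : Nat) :
    ((∑ s ∈ Finset.range (N + 1), pvP p s * pvPre p (N - s)) - pvP p 0 * pvP p 0)
      + (∑ s ∈ Finset.Icc 1 (N / 2), pvP p s * pvP p s) = 2 * pvSA p N := by
  rw [pv_I1, ← pv_I3]
  have hsplit : ∑ k ∈ Finset.range (N + 1), pvRow p k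
      = pvRow p 0 + ∑ k ∈ Finset.Icc 1 N, pvRow p k := by
    rw [Finset.sum_range_succ', pv_sum_Icc_range]
    simp only [Nat.add_sub_cancel]
    rw [add_comm]
    congr 1
    exact Finset.sum_congr rfl fun i _ => by rw [Nat.add_comm]
  have hrow0 : pvRow p 0 = pvP p 0 * pvP p 0 := by
    simp [pvRow]
  rw [hsplit, hrow0, pvSA]
  have : ∑ k ∈ Finset.Icc 1 N, pvRow p k + ∑ k ∈ Finset.Icc 1 N, pvInd p k
      = ∑ k ∈ Finset.Icc 1 N, (2 * pvArow p k) := by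
    rw [← Finset.sum_add_distrib]
    refine Finset.sum_congr rfl ?_
    intro k hk
    simp only [Finset.mem_Icc] at hk
    exact pv_I2 p k hk.1
  rw [Finset.mul_sum]
  have harow : ∀ k, pvArow p k = ∑ s ∈ Finset.Icc ((k + 1) / 2) k, pvP p s * pvP p (k - s) :=
    fun k => rfl
  simp only [← harow]
  omega

theorem pv_B_char (p : List Int) (N : Nat) (hN : 1 ≤ N) (hlen : N < p.length) :
    compute_e_alt (N : Int) p = ((pvT p N + pvD p N) * 617283946) % pvMOD := by
  have hcond : ¬ ((N : Int) < 1) := by omega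
  have hinv : PySem.Int.floordiv (pvMOD + 1) 2 = 617283946 := by
    rw [PySem.Int.floordiv_eq_ediv_of_pos (by norm_num)]
    norm_num [pvMOD]
  have hslice : PySem.List.slice p none (some ((N : Int) + 1)) = p.take (N + 1) := by
    rw [PySem.List.slice_to p (show (0:Int) ≤ (N:Int)+1 by omega)]
    congr 1
  set q : List Int := (p.take (N + 1)).map (fun x => x % pvMOD) with hq
  have hqlen : q.length = N + 1 := by
    simp only [hq, List.length_map, List.length_take]
    omega
  have hqget : ∀ s : Nat, s ≤ N → q.getD s 0 = pvP p s % pvMOD := by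
    intro s hs
    rw [List.getD_eq_getElem q 0 (by omega)]
    simp only [hq, List.getElem_map, List.getElem_take]
    rw [pvP, List.getD_eq_getElem p 0 (by omega)]
  have hpref0 := pv_pref_fold q 0 []
  simp only [Int.zero_emod, zero_add, List.nil_append] at hpref0
  set pref : List Int := (List.range q.length).map (fun m => (q.take (m + 1)).sum % pvMOD)
    with hprefdef
  have hprefget : ∀ m : Nat, m ≤ N → pref.getD m 0 = pvPre p m % pvMOD := by
    intro m hm
    rw [hprefdef, PySem.List.getD_map_range _ _ _ _ (by omega)]
    have ht : q.take (m + 1) = (p.take (m + 1)).map (fun x => x % pvMOD) := by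
      rw [hq, ← List.map_take, List.take_take]
      have hmin : min (m + 1) (N + 1) = m + 1 := by omega
      rw [hmin]
    rw [ht, pv_map_mod_sum, pv_take_sum p (m + 1) (by omega)]
    rfl
  simp only [compute_e_alt, pmod_eq]
  rw [if_neg hcond, hslice, ← hq, hpref0, hinv]
  simp only []
  have hflN : PySem.Int.floordiv ((N : Int)) 2 = ((N / 2 : Nat) : Int) := by
    exact_mod_cast PySem.Int.floordiv_natCast N 2
  rw [hflN]
  have htot := pv_foldl_mod (fun s => PySem.List.pyGetD q s 0 * PySem.List.pyGetD pref ((N : Int) - s) 0)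
    (PySem.List.pyRange 0 ((N : Int) + 1) 1) 0
  have hdia := pv_foldl_mod (fun s => PySem.List.pyGetD q s 0 * PySem.List.pyGetD q s 0)
    (PySem.List.pyRange 1 (((N / 2 : Nat) : Int) + 1) 1) 0
  simp only [Int.zero_emod, zero_add] at htot hdia
  rw [htot, hdia]
  -- S1 to Finset
  have hS1 : (List.map (fun s => PySem.List.pyGetD q s 0 * PySem.List.pyGetD pref ((N : Int) - s) 0)
        (PySem.List.pyRange 0 ((N : Int) + 1) 1)).sum
      = ∑ j ∈ Finset.range (N + 1), (pvP p j % pvMOD) * (pvPre p (N - j) % pvMOD) := by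
    rw [PySem.List.pyRange_one]
    have hlen1 : ((N : Int) + 1 - 0).toNat = N + 1 := by omega
    rw [hlen1, List.map_map, pv_bridge]
    refine Finset.sum_congr rfl ?_
    intro j hj
    simp only [Finset.mem_range] at hj
    simp only [Function.comp_apply, zero_add]
    rw [show (N : Int) - (j : Int) = ((N - j : Nat) : Int) by omega]
    rw [PySem.List.pyGetD_natCast, PySem.List.pyGetD_natCast,
      hqget j (by omega), hprefget (N - j) (by omega)]
  have hS2 : (List.map (fun s => PySem.List.pyGetD q s 0 * PySem.List.pyGetD q s 0)
        (PySem.List.pyRange 1 (((N / 2 : Nat) : Int) + 1) 1)).sum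
      = ∑ j ∈ Finset.range (N / 2), (pvP p (1 + j) % pvMOD) * (pvP p (1 + j) % pvMOD) := by
    rw [PySem.List.pyRange_one]
    have hlen2 : (((N / 2 : Nat) : Int) + 1 - 1).toNat = N / 2 := by omega
    rw [hlen2, List.map_map, pv_bridge]
    refine Finset.sum_congr rfl ?_
    intro j hj
    simp only [Finset.mem_range] at hj
    simp only [Function.comp_apply]
    rw [show (1 : Int) + (j : Int) = ((1 + j : Nat) : Int) by omega]
    rw [PySem.List.pyGetD_natCast, hqget (1 + j) (by omega)]
  rw [hS1, hS2]
  have hA1m : (∑ j ∈ Finset.range (N + 1), (pvP p j % pvMOD) * (pvPre p (N - j) % pvMOD)) % pvMOD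
      = (∑ j ∈ Finset.range (N + 1), pvP p j * pvPre p (N - j)) % pvMOD :=
    pv_fsum_mod_congr _ _ _ (fun j _ => (Int.mul_emod _ _ _).symm)
  have hS2m : (∑ j ∈ Finset.range (N / 2), (pvP p (1 + j) % pvMOD) * (pvP p (1 + j) % pvMOD)) % pvMOD
      = pvD p N % pvMOD := by
    rw [pv_fsum_mod_congr _ _ (fun j => pvP p (1 + j) * pvP p (1 + j))
      (fun j _ => (Int.mul_emod _ _ _).symm)]
    rw [pvD, pv_sum_Icc_range]
    simp only [Nat.add_sub_cancel]
  -- q0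
  rw [PySem.List.pyGetD_zero]
  have hq0 : q.getD 0 0 = pvP p 0 % pvMOD := hqget 0 (by omega)
  rw [hq0]
  rw [pv_mul_emod_left]
  refine Int.ModEq.mul_right _ (Int.ModEq.add ?_ ?_)
  · show (_ % pvMOD) = _
    refine Int.ModEq.sub ?_ ((Int.mul_emod _ _ _).symm)
    show (_ % pvMOD) = _
    rw [Int.emod_emod_of_dvd _ dvd_rfl]
    exact hA1m
  · exact hS2m

theorem pv_final (p : List Int) (N : Nat) :
    ((pvT p N + pvD p N) * 617283946) % pvMOD = pvSA p N % pvMOD := by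
  have hid : pvT p N + pvD p N = 2 * pvSA p N := pv_identity p N
  rw [hid]
  have h2 : 2 * pvSA p N * 617283946 = pvSA p N + pvSA p N * pvMOD := by
    rw [pvMOD]; ring
  rw [h2, Int.add_mul_emod_self_right]

-- ===== VERDICT (by name: the statement is the Claim_ definition above) =====
theorem compute_e_spec : Claim_equal_compute_e := by
  intro n p _ hpre
  unfold Spec_compute_e
  by_cases hn : n < 1
  · have hA : compute_e n p = 0 := by
      rw [compute_e, PySem.List.pyRange_one_eq_nil (by omega)]
      rfl
    have hB : compute_e_alt n p = 0 := by
      rw [compute_e_alt, if_pos hn]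
    rw [hA, hB]
  · have hlen : n < (p.length : Int) := by
      rcases hpre with h | h
      · exact absurd h hn
      · exact h
    have hN : n = ((n.toNat : Nat) : Int) := by omega
    rw [hN, pv_A_char, pv_B_char p n.toNat (by omega) (by omega), pv_final]
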